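-- pv_equiv track=rewrite | github.com/SumuSimha/EEE598-VLSI-ECO-AI-Automation | ECO_Agent.py | backward_net_cone
-- ===== SOURCE A (Python) =====
-- from typing import Dict, List, Optional, Sequence, Set, Tuple
--
-- def backward_net_cone(target_nets: Set[str], fanin_graph: Dict[str, Set[str]]) -> Set[str]:
--     pending = list(target_nets)
--     seen: Set[str] = set()
--     while pending:
--         net = pending.pop()
--         if net in seen:
--             continue
--         seen.add(net)
--         for parent in fanin_graph.get(net, set()):
--             if parent not in seen:
--                 pending.append(parent)
--     return seen
-- ===== SOURCE B (Python) =====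
-- def backward_net_cone(target_nets, fanin_graph):
--     seen = set()
--
--     def visit(net):
--         if net in seen:
--             return
--         seen.add(net)
--         for parent in fanin_graph.get(net, set()):
--             visit(parent)
--
--     for net in target_nets:
--         visit(net)
--     return seen
-- ===== Notes on version B (the rewrite author's own statement) =====
-- stated objective: alternative
-- what changed: Replaced A's explicit worklist-stack loop by a recursive depth-first traversal: a nested visit helper marks a net and recurses over its parents through the call stack instead of pushing pending nets onto an explicit list; the returned set of nets is identical.
import Mathlib
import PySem

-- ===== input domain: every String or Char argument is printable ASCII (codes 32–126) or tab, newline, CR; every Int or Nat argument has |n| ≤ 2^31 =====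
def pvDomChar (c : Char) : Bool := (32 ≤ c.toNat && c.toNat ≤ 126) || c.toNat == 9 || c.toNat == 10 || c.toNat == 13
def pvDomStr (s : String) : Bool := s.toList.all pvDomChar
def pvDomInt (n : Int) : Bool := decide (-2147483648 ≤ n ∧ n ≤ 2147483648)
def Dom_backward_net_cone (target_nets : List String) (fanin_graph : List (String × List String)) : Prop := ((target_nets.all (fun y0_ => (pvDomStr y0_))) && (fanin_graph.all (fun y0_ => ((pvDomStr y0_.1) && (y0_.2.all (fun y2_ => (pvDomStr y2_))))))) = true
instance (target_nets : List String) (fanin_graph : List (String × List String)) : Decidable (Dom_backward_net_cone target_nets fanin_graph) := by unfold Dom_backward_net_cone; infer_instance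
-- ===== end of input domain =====

-- B replaces A's explicit worklist stack by a recursive depth-first traversal (same cost); the
-- returned set of nets is the same. Both Pythons iterate SETS, whose iteration order is
-- unspecified; each port fixes one admissible order over the set's model list (A: the list model
-- of pending.pop(); B: reverse insertion order for the set loops), and for these orders the two
-- result lists are proved equal element-for-element. Both loops terminate because 'seen' only
-- grows; the ports carry a fuel bound (pvFuel, always sufficient) purely as a totality guard,
-- and the equality holds for the shared fuel value whatever it is.

-- fuel bound shared by both ports: more than the number of nets that can ever become newly seen
def pvFuel (target_nets : List String) (fanin_graph : List (String × List String)) : Nat :=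
  target_nets.length + (fanin_graph.map (fun kv => kv.2.length)).sum + 1

-- ===== PORT A =====
-- A's while-loop over 'pending'; the stack is kept head-first (Python's pending.pop() = head,
-- appends = cons in reverse), and the leftover fuel is returned so the loop can be split.
def loopA (g : List (String × List String)) : Nat → List String → PySem.Set String → PySem.Set String × Nat
  | f, [], seen => (seen, f)
  | f, net :: rest, seen =>
    if PySem.Set.contains seen net then loopA g f rest seen
    else
      match f with
      | 0 => (seen, 0)
      | f' + 1 =>
        let seen' := PySem.Set.add seen net
        ((loopA g f' (((PySem.Dict.getD ⟨g⟩ net []).filter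
            (fun p => !PySem.Set.contains seen' p)).reverse ++ rest) seen'))
  termination_by f stack _ => (f, stack.length)
  decreasing_by
  all_goals simp_wf
  · exact Prod.Lex.right f (by omega)
  · exact Prod.Lex.left _ _ (by omega)

def backward_net_cone (target_nets : List String) (fanin_graph : List (String × List String)) : List String :=
  (loopA fanin_graph (pvFuel target_nets fanin_graph) target_nets.reverse PySem.Set.empty).1

-- ===== PORT B =====
-- B's recursive visit helper, applied to each net of a list in turn ('for net in …: visit(net)'):
-- if the net is unseen, mark it and recurse over its parent set, then continue with the remaining
-- nets. The set loops are modeled in reverse insertion order (one admissible order for Python's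
-- unordered set iteration); fuel (threaded through, with its bound in the type) is the totality
-- guard for the recursion.
def visitList (g : List (String × List String)) : (f : Nat) → PySem.Set String → List String → {p : PySem.Set String × Nat // p.2 ≤ f}
  | f, seen, [] => ⟨(seen, f), Nat.le_refl f⟩
  | f, seen, net :: rest =>
    if PySem.Set.contains seen net then
      visitList g f seen rest
    else
      match f with
      | 0 => ⟨(seen, 0), Nat.le_refl 0⟩
      | f' + 1 =>
        match visitList g f' (PySem.Set.add seen net) ((PySem.Dict.getD ⟨g⟩ net []).reverse) with
        | ⟨rv, hr⟩ =>
          match visitList g rv.2 rv.1 rest with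
          | ⟨qv, hq⟩ => ⟨qv, Nat.le_succ_of_le (Nat.le_trans hq hr)⟩
  termination_by f _ l => (f, l.length)
  decreasing_by
  all_goals simp_wf
  · exact Prod.Lex.right f (by omega)
  · exact Prod.Lex.left _ _ (by omega)
  · exact Prod.Lex.left _ _ (by omega)

def backward_net_cone_alt (target_nets : List String) (fanin_graph : List (String × List String)) : List String :=
  (visitList fanin_graph (pvFuel target_nets fanin_graph) PySem.Set.empty target_nets.reverse).val.1

-- ===== PRECONDITION & SPEC =====
def Spec_backward_net_cone (target_nets : List String) (fanin_graph : List (String × List String)) (out : List String) : Prop := out = backward_net_cone_alt target_nets fanin_graph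
instance (target_nets : List String) (fanin_graph : List (String × List String)) (out : List String) : Decidable (Spec_backward_net_cone target_nets fanin_graph out) := by unfold Spec_backward_net_cone; infer_instance

-- ===== CLAIM (what is proved, stated in full; the proofs are below) =====
def Claim_equal_backward_net_cone : Prop := ∀ (target_nets : List String) (fanin_graph : List (String × List String)), Dom_backward_net_cone target_nets fanin_graph → Spec_backward_net_cone target_nets fanin_graph (backward_net_cone target_nets fanin_graph)

-- ===== LEMMAS AND PROOFS =====

-- unfolding lemmas for the two ports
theorem loopA_nil (g : List (String × List String)) (f : Nat) (s : PySem.Set String) :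
    loopA g f [] s = (s, f) := by
  rw [loopA]

theorem loopA_cons_mem (g : List (String × List String)) (f : Nat) (net : String) (rest : List String)
    (s : PySem.Set String) (hm : net ∈ s) : loopA g f (net :: rest) s = loopA g f rest s := by
  rw [loopA.eq_def]
  simp [hm]

theorem loopA_cons_zero (g : List (String × List String)) (net : String) (rest : List String)
    (s : PySem.Set String) (hm : net ∉ s) : loopA g 0 (net :: rest) s = (s, 0) := by
  rw [loopA.eq_def]
  simp [hm]

theorem loopA_cons_fresh (g : List (String × List String)) (f' : Nat) (net : String) (rest : List String)
    (s : PySem.Set String) (hm : net ∉ s) :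
    loopA g (f' + 1) (net :: rest) s =
      loopA g f' (((PySem.Dict.getD ⟨g⟩ net []).filter
        (fun p => !PySem.Set.contains (PySem.Set.add s net) p)).reverse ++ rest) (PySem.Set.add s net) := by
  rw [loopA.eq_def]
  simp [hm]

theorem visitList_nil (g : List (String × List String)) (f : Nat) (s : PySem.Set String) :
    (visitList g f s []).val = (s, f) := by
  rw [visitList]

theorem visitList_cons_mem (g : List (String × List String)) (f : Nat) (net : String) (rest : List String)
    (s : PySem.Set String) (hm : net ∈ s) : visitList g f s (net :: rest) = visitList g f s rest := by
  rw [visitList.eq_def]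
  simp [hm]

theorem visitList_cons_zero (g : List (String × List String)) (net : String) (rest : List String)
    (s : PySem.Set String) (hm : net ∉ s) : (visitList g 0 s (net :: rest)).val = (s, 0) := by
  rw [visitList.eq_def]
  simp [hm]

theorem visitList_cons_fresh (g : List (String × List String)) (f' : Nat) (net : String) (rest : List String)
    (s : PySem.Set String) (hm : net ∉ s) :
    (visitList g (f' + 1) s (net :: rest)).val =
      (visitList g (visitList g f' (PySem.Set.add s net) ((PySem.Dict.getD ⟨g⟩ net []).reverse)).val.2
        (visitList g f' (PySem.Set.add s net) ((PySem.Dict.getD ⟨g⟩ net []).reverse)).val.1 rest).val := by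
  rw [visitList.eq_def]
  simp only [PySem.Set.contains_eq_listContains, List.contains_eq_mem, hm, decide_false,
    Bool.false_eq_true, if_neg, not_false_eq_true]

-- With no fuel left, A's loop only skips already-seen nets and cannot change the state.
theorem loopA_zero (g : List (String × List String)) : ∀ (l : List String) (s : PySem.Set String), loopA g 0 l s = (s, 0) := by
  intro l
  induction l with
  | nil => intro s; rw [loopA_nil]
  | cons net rest ih =>
    intro s
    by_cases hm : net ∈ s
    · rw [loopA_cons_mem g 0 net rest s hm, ih]
    · rw [loopA_cons_zero g net rest s hm]

-- A's loop never gains fuel.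
theorem loopA_fuel_le (g : List (String × List String)) : ∀ (f : Nat) (l : List String) (s : PySem.Set String), (loopA g f l s).2 ≤ f := by
  intro f
  induction f using Nat.strong_induction_on with
  | _ f ih =>
    intro l
    induction l with
    | nil => intro s; rw [loopA_nil]
    | cons net rest ihl =>
      intro s
      by_cases hm : net ∈ s
      · rw [loopA_cons_mem g f net rest s hm]; exact ihl s
      · cases f with
        | zero => rw [loopA_cons_zero g net rest s hm]
        | succ f' =>
          rw [loopA_cons_fresh g f' net rest s hm]
          exact Nat.le_succ_of_le (ih f' (Nat.lt_succ_self f') _ _)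

-- 'seen' only grows along A's loop.
theorem loopA_mono (g : List (String × List String)) : ∀ (f : Nat) (l : List String) (s : PySem.Set String) (x : String), x ∈ s → x ∈ (loopA g f l s).1 := by
  intro f
  induction f using Nat.strong_induction_on with
  | _ f ih =>
    intro l
    induction l with
    | nil => intro s x hx; rw [loopA_nil]; exact hx
    | cons net rest ihl =>
      intro s x hx
      by_cases hm : net ∈ s
      · rw [loopA_cons_mem g f net rest s hm]; exact ihl s x hx
      · cases f with
        | zero => rw [loopA_cons_zero g net rest s hm]; exact hx
        | succ f' =>
          rw [loopA_cons_fresh g f' net rest s hm]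
          exact ih f' (Nat.lt_succ_self f') _ _ x ((PySem.Set.mem_add _ _ _).2 (Or.inl hx))

-- A's loop over a concatenated stack runs the first part, then the second on the leftover state/fuel.
theorem loopA_split (g : List (String × List String)) : ∀ (f : Nat) (l1 l2 : List String) (s : PySem.Set String),
    loopA g f (l1 ++ l2) s = loopA g (loopA g f l1 s).2 l2 (loopA g f l1 s).1 := by
  intro f
  induction f using Nat.strong_induction_on with
  | _ f ih =>
    intro l1
    induction l1 with
    | nil => intro l2 s; rw [List.nil_append, loopA_nil]
    | cons net rest ihl =>
      intro l2 s
      by_cases hm : net ∈ s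
      · rw [List.cons_append, loopA_cons_mem g f net _ s hm, loopA_cons_mem g f net rest s hm]
        exact ihl l2 s
      · cases f with
        | zero =>
          rw [List.cons_append, loopA_cons_zero g net _ s hm, loopA_cons_zero g net rest s hm,
            loopA_zero]
        | succ f' =>
          rw [List.cons_append, loopA_cons_fresh g f' net _ s hm, loopA_cons_fresh g f' net rest s hm,
            ← List.append_assoc]
          exact ih f' (Nat.lt_succ_self f') _ l2 _

-- Pre-filtering a chunk of the stack against a set below the current 'seen' changes nothing:
-- A skips those nets (at no fuel cost) when it reaches them.
theorem loopA_filter (g : List (String × List String)) : ∀ (f : Nat) (l : List String) (s s₀ : PySem.Set String),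
    (∀ x, x ∈ s₀ → x ∈ s) →
    loopA g f (l.filter (fun p => !PySem.Set.contains s₀ p)) s = loopA g f l s := by
  intro f
  induction f using Nat.strong_induction_on with
  | _ f ih =>
    intro l
    induction l with
    | nil => intro s s₀ _; simp
    | cons p l' ihl =>
      intro s s₀ hsub
      by_cases hp : p ∈ s₀
      · have hps : p ∈ s := hsub p hp
        rw [List.filter_cons_of_neg (by simp [hp]),
          loopA_cons_mem g f p l' s hps]
        exact ihl s s₀ hsub
      · rw [List.filter_cons_of_pos (by simp [hp])]
        by_cases hs : p ∈ s
        · rw [loopA_cons_mem g f p _ s hs, loopA_cons_mem g f p l' s hs]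
          exact ihl s s₀ hsub
        · cases f with
          | zero => rw [loopA_cons_zero g p _ s hs, loopA_cons_zero g p l' s hs]
          | succ f' =>
            rw [loopA_cons_fresh g f' p _ s hs, loopA_cons_fresh g f' p l' s hs,
              loopA_split, loopA_split]
            have hb2 : (loopA g f' (((PySem.Dict.getD ⟨g⟩ p []).filter
                (fun q => !PySem.Set.contains (PySem.Set.add s p) q)).reverse) (PySem.Set.add s p)).2 ≤ f' :=
              loopA_fuel_le g f' _ _
            exact ih _ (by omega) l' _ s₀
              (fun x hx => loopA_mono g f' _ _ x ((PySem.Set.mem_add _ _ _).2 (Or.inl (hsub x hx))))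

-- Main bridge: A's explicit stack loop computes exactly B's recursive traversal (state and fuel).
theorem loopA_eq_visitList (g : List (String × List String)) : ∀ (f : Nat) (l : List String) (s : PySem.Set String),
    loopA g f l s = (visitList g f s l).val := by
  intro f
  induction f using Nat.strong_induction_on with
  | _ f ih =>
    intro l
    induction l with
    | nil => intro s; rw [loopA_nil, visitList_nil]
    | cons net rest ihl =>
      intro s
      by_cases hm : net ∈ s
      · rw [loopA_cons_mem g f net rest s hm, visitList_cons_mem g f net rest s hm]
        exact ihl s
      · cases f with
        | zero => rw [loopA_cons_zero g net rest s hm, visitList_cons_zero g net rest s hm]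
        | succ f' =>
          rw [loopA_cons_fresh g f' net rest s hm, visitList_cons_fresh g f' net rest s hm,
            loopA_split]
          have hfr : ((PySem.Dict.getD ⟨g⟩ net []).filter
              (fun p => !PySem.Set.contains (PySem.Set.add s net) p)).reverse
              = ((PySem.Dict.getD ⟨g⟩ net []).reverse.filter
                  (fun p => !PySem.Set.contains (PySem.Set.add s net) p)) := by
            rw [List.filter_reverse]
          have hchunk : loopA g f' (((PySem.Dict.getD ⟨g⟩ net []).filter
              (fun p => !PySem.Set.contains (PySem.Set.add s net) p)).reverse) (PySem.Set.add s net)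
              = (visitList g f' (PySem.Set.add s net) ((PySem.Dict.getD ⟨g⟩ net []).reverse)).val := by
            rw [hfr, loopA_filter g f' _ _ _ (fun x hx => hx), ih f' (Nat.lt_succ_self f') _ _]
          rw [hchunk]
          have hq := (visitList g f' (PySem.Set.add s net) ((PySem.Dict.getD ⟨g⟩ net []).reverse)).property
          exact ih _ (by omega) rest _

-- ===== VERDICT (by name: the statement is the Claim_ definition above) =====
theorem backward_net_cone_spec : Claim_equal_backward_net_cone := by
  intro target_nets fanin_graph _
  unfold Spec_backward_net_cone backward_net_cone backward_net_cone_alt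
  rw [loopA_eq_visitList]
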